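-- pv_equiv track=rewrite | github.com/fafeisal/comp110-21f-workspace | projects/pj01/data_utils.py | binary
-- ===== SOURCE A (Python) =====
-- def binary(answers: list[str]) -> dict[str, int]:
--     """Frequencies of overall yes and no answers."""
--     result: dict[str, int] = {}
--
--     for value in answers:
--         if value == "No":
--             if value in result:
--                 result[value] += 1
--             else:
--                 result[value] = 1
--         else:
--             if 'Yes' in result:
--                 result['Yes'] += 1
--             else:
--                 result['Yes'] = 1
--
--     return result
-- ===== SOURCE B (Python) =====
-- def binary(answers: list[str]) -> dict[str, int]:
--     """Frequencies of overall yes and no answers."""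
--     no = answers.count("No")
--     yes = len(answers) - no
--     result: dict[str, int] = {}
--     if yes:
--         result["Yes"] = yes
--     if no:
--         result["No"] = no
--     return result
-- ===== Notes on version B (the rewrite author's own statement) =====
-- stated objective: faster
-- what changed: Replaces the per-element classify-and-update loop over a growing dict by a single answers.count("No") scan plus complement arithmetic (yes = len - no), inserting the keys Yes then No conditionally; Pre_ excludes lists that start with "No" yet also contain a non-"No" answer, where A's Yes/No key order is an accident of dict insertion order.
-- outside the precondition, e.g. on binary(['No', 'Yes']): A returns {'No': 1, 'Yes': 1}, B returns {'Yes': 1, 'No': 1}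
import Mathlib
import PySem

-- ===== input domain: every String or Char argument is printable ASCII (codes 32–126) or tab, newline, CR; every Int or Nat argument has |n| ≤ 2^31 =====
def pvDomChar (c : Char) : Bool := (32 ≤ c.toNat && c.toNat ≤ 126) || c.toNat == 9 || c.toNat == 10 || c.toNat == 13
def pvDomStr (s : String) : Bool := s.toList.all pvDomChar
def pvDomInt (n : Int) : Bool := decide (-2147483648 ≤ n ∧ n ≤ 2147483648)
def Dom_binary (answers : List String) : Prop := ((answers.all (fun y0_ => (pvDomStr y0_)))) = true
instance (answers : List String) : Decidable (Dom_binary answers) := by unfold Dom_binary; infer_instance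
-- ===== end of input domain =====

-- B replaces A's per-element classify-and-update loop by one count("No") scan plus complement
-- arithmetic, inserting "Yes" then "No" conditionally; objective: faster (constant factor).


-- ===== PORT A =====
-- loop body of A: classify one answer into the dict
def binaryStep (result : PySem.Dict String Int) (value : String) : PySem.Dict String Int :=
  if value = "No" then
    if result.contains value then result.insert value (result.getD value 0 + 1)
    else result.insert value 1
  else
    if result.contains "Yes" then result.insert "Yes" (result.getD "Yes" 0 + 1)
    else result.insert "Yes" 1

def binary (answers : List String) : List (String × Int) :=
  (answers.foldl binaryStep PySem.Dict.empty).items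

-- ===== PORT B =====
def binary_alt (answers : List String) : List (String × Int) :=
  let no : Int := PySem.List.count answers "No"
  let yes : Int := PySem.List.len answers - no
  (if yes ≠ 0 then [("Yes", yes)] else []) ++ (if no ≠ 0 then [("No", no)] else [])

-- ===== PRECONDITION & SPEC =====
-- Pre_ excludes lists that start with "No" yet also contain a non-"No" answer: there A's
-- Yes/No key order in the returned dict is an accident of dict insertion order, and either
-- order is as defensible as the other.
def Pre_binary (answers : List String) : Prop :=
  answers.head? = some "No" → answers.count "No" = answers.length
instance (answers : List String) : Decidable (Pre_binary answers) := by unfold Pre_binary; infer_instance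
def pvWitness_binary : List String := ["Yes", "No", "maybe"]

def Spec_binary (answers : List String) (out : List (String × Int)) : Prop := out = binary_alt answers
instance (answers : List String) (out : List (String × Int)) : Decidable (Spec_binary answers out) := by unfold Spec_binary; infer_instance

-- ===== CLAIM (what is proved, stated in full; the proofs are below) =====
def Claim_equal_binary : Prop := ∀ (answers : List String), Dom_binary answers → Pre_binary answers → Spec_binary answers (binary answers)

-- ===== LEMMAS AND PROOFS =====

-- the two shapes A's dict can have: "No" first (n ≥ 1), or "Yes" first (y ≥ 1)
def noD (n y : Int) : PySem.Dict String Int :=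
  PySem.Dict.mk (("No", n) :: (if 0 < y then [("Yes", y)] else []))
def yesD (y n : Int) : PySem.Dict String Int :=
  PySem.Dict.mk (("Yes", y) :: (if 0 < n then [("No", n)] else []))

lemma step_noD_no (n y : Int) : binaryStep (noD n y) "No" = noD (n + 1) y := by
  by_cases hy : 0 < y <;>
    simp [binaryStep, noD, hy, PySem.Dict.contains, PySem.Dict.insert, PySem.Dict.getD,
      PySem.Dict.get?]

lemma step_yesD_no (y n : Int) (hn : 0 ≤ n) : binaryStep (yesD y n) "No" = yesD y (n + 1) := by
  by_cases hn' : 0 < n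
  · simp [binaryStep, yesD, hn', hn, PySem.Dict.contains, PySem.Dict.insert,
      PySem.Dict.getD, PySem.Dict.get?]
  · have hn0 : n = 0 := by omega
    subst hn0
    simp [binaryStep, yesD, PySem.Dict.contains, PySem.Dict.insert, PySem.Dict.getD,
      PySem.Dict.get?]

lemma step_yesD_yes (y n : Int) (v : String) (hv : v ≠ "No") :
    binaryStep (yesD y n) v = yesD (y + 1) n := by
  by_cases hn : 0 < n <;>
    simp [binaryStep, yesD, hv, hn, PySem.Dict.contains, PySem.Dict.insert, PySem.Dict.getD,
      PySem.Dict.get?]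

lemma fold_noD_allNo (rest : List String) : ∀ (n : Int), (∀ v ∈ rest, v = "No") →
    rest.foldl binaryStep (noD n 0) = noD (n + rest.length) 0 := by
  induction rest with
  | nil => intro n _; simp [noD]
  | cons v rest ih =>
    intro n hall
    have hv : v = "No" := hall v (by simp)
    subst hv
    rw [List.foldl_cons, step_noD_no, ih (n + 1) (fun w hw => hall w (by simp [hw]))]
    simp only [List.length_cons]
    congr 1
    push_cast; ring

lemma fold_yesD (rest : List String) : ∀ (y n : Int), 0 ≤ n →
    rest.foldl binaryStep (yesD y n) =
      yesD (y + (rest.length - rest.count "No")) (n + rest.count "No") := by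
  induction rest with
  | nil => intro y n _; simp [yesD]
  | cons v rest ih =>
    intro y n hn
    by_cases hv : v = "No"
    · subst hv
      rw [List.foldl_cons, step_yesD_no y n hn, ih y (n + 1) (by omega)]
      simp only [List.count_cons_self, List.length_cons]
      congr 1 <;> push_cast <;> ring
    · have hb : (v == "No") = false := by simp [hv]
      rw [List.foldl_cons, step_yesD_yes y n v hv, ih (y + 1) n hn]
      simp only [List.count_cons, hb, Bool.false_eq_true, if_false, List.length_cons, add_zero]
      congr 1 <;> push_cast <;> ring

-- ===== VERDICT (by name: the statement is the Claim_ definition above) =====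
theorem binary_spec : Claim_equal_binary := by
  intro answers _ hpre
  unfold Spec_binary binary binary_alt
  cases answers with
  | nil => simp [PySem.Dict.empty, PySem.List.count, PySem.List.len]
  | cons a rest =>
    have hcount : (rest.count "No" : Int) ≤ (rest.length : Int) := by
      exact_mod_cast List.count_le_length
    by_cases ha : a = "No"
    · subst ha
      have hall : ∀ v ∈ ("No" :: rest), v = "No" := by
        have h := hpre (by simp)
        intro v hv
        by_contra hne
        have := (List.count_eq_length.mp h) v hv
        exact hne this.symm
      have h1 : binaryStep PySem.Dict.empty "No" = noD 1 0 := by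
        simp [binaryStep, noD, PySem.Dict.empty, PySem.Dict.contains, PySem.Dict.insert,
          PySem.Dict.get?]
      have hallr : ∀ v ∈ rest, v = "No" := fun v hv => hall v (by simp [hv])
      have hcr : rest.count "No" = rest.length := by
        have := hpre (by simp)
        simpa using this
      rw [List.foldl_cons, h1, fold_noD_allNo rest 1 hallr]
      simp only [PySem.List.count, PySem.List.len, List.count_cons_self, List.length_cons,
        noD, hcr]
      push_cast
      rw [if_neg (by omega : ¬((rest.length : Int) + 1 - ((rest.length : Int) + 1) ≠ 0))]
      rw [if_pos (by omega : ((rest.length : Int) + 1) ≠ 0)]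
      simp [PySem.Dict.items]
      omega
    · have h1 : binaryStep PySem.Dict.empty a = yesD 1 0 := by
        simp [binaryStep, yesD, ha, PySem.Dict.empty, PySem.Dict.contains, PySem.Dict.insert,
          PySem.Dict.get?]
      have h2 : yesD (1 + ((rest.length : Int) - rest.count "No")) (0 + (rest.count "No" : Int)) =
          yesD (((rest.length : Int) + 1) - rest.count "No") (rest.count "No" : Int) := by
        congr 1 <;> ring
      rw [List.foldl_cons, h1, fold_yesD rest 1 0 le_rfl, h2]
      have hb : (a == "No") = false := by simp [ha]
      simp only [PySem.List.count, PySem.List.len, List.count_cons, hb, Bool.false_eq_true,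
        if_false, add_zero, List.length_cons, yesD]
      push_cast
      rw [if_pos (by omega : ((rest.length : Int) + 1) - (rest.count "No" : Int) ≠ 0)]
      by_cases hc : (rest.count "No" : Int) ≠ 0
      · rw [if_pos hc]
        have hm : 0 < rest.count "No" := by omega
        have hi : (0:Int) < (rest.count "No" : Int) := by omega
        simp only [PySem.Dict.items, if_pos hi]
        simp
      · rw [if_neg hc]
        have hi : ¬ (0:Int) < (rest.count "No" : Int) := by omega
        simp only [PySem.Dict.items, if_neg hi]
        simp
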